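-- pv_equiv track=rewrite | github.com/yaskhan/bevy_migrate | src/config/migration_rules.py | get_migration_path
-- ===== SOURCE A (Python) =====
-- from typing import Dict, List, Any, Optional
--
-- def get_migration_path(from_version: str, to_version: str) -> List[str]:
--     """
--     Get the migration path between two versions
--
--     Args:
--         from_version: Starting version
--         to_version: Target version
--
--     Returns:
--         List of version transition keys
--     """
--     supported_versions = ["0.15", "0.16", "0.17", "0.18"]
--
--     try:
--         from_idx = supported_versions.index(from_version)
--         to_idx = supported_versions.index(to_version)
--     except ValueError:
--         return []
--
--     if from_idx >= to_idx:
--         return []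
--
--     path = []
--     for i in range(from_idx, to_idx):
--         current_version = supported_versions[i]
--         next_version = supported_versions[i + 1]
--         path.append(f"{current_version}->{next_version}")
--
--     return path
-- ===== SOURCE B (Python) =====
-- def get_migration_path(from_version: str, to_version: str) -> list:
--     """Single forward pass over the version list as a state machine:
--     start collecting transitions after from_version is seen, finish when
--     to_version is seen while collecting; any other outcome yields []."""
--     path = []
--     collecting = False
--     prev = None
--     for v in ["0.15", "0.16", "0.17", "0.18"]:
--         if collecting:
--             path.append(f"{prev}->{v}")
--         if v == to_version:
--             return path if collecting else []
--         if v == from_version: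
--             collecting = True
--         prev = v
--     return []
-- ===== Notes on version B (the rewrite author's own statement) =====
-- stated objective: alternative
-- what changed: B replaces A's two .index lookups, the from_idx>=to_idx guard and the windowed range loop by a single forward state-machine pass over the version list that starts collecting adjacent transitions after from_version and returns when to_version is reached while collecting, with no index arithmetic at all.
import Mathlib
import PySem

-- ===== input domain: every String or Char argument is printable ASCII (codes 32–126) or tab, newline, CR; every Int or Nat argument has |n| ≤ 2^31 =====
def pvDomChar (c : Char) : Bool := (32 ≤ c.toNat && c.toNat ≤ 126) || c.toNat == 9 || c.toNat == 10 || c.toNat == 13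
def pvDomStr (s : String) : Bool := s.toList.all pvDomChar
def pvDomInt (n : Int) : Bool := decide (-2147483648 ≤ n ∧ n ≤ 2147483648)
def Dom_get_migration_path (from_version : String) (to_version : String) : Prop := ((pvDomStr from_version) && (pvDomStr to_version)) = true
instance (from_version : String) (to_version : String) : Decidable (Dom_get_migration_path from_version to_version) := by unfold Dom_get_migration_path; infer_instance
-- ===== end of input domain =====

-- B replaces A's index lookups + guard + windowed loop by a single state-machine pass over the version list (objective: alternative).

-- ===== PORT A =====
-- Port of A: resolve both indices, guard from_idx >= to_idx, then loop over range(from_idx, to_idx) appending keys.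
def get_migration_path (from_version : String) (to_version : String) : List String :=
  let supported_versions : List String := ["0.15", "0.16", "0.17", "0.18"]
  match PySem.List.index? supported_versions from_version,
        PySem.List.index? supported_versions to_version with
  | some from_idx, some to_idx =>
    if (to_idx : Int) ≤ (from_idx : Int) then []
    else
      (PySem.List.pyRange (from_idx : Int) (to_idx : Int) 1).foldl
        (fun path i =>
          path ++ [PySem.List.pyGetD supported_versions i "" ++ "->" ++
                   PySem.List.pyGetD supported_versions (i + 1) ""]) []
  | _, _ => []

-- ===== PORT B =====
-- Port of B's for-loop: structural recursion over the version list carrying (path, collecting, prev).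
-- prev is Option String (Python's None); .getD "None" mirrors f-string rendering of None (never reached when collecting).
def gmpWalk (from_version to_version : String) :
    List String → List String → Bool → Option String → List String
  | [], _, _, _ => []
  | v :: rest, path, collecting, prev =>
    let path := if collecting then path ++ [prev.getD "None" ++ "->" ++ v] else path
    if v == to_version then (if collecting then path else [])
    else gmpWalk from_version to_version rest path (collecting || (v == from_version)) (some v)

def get_migration_path_alt (from_version : String) (to_version : String) : List String :=
  gmpWalk from_version to_version ["0.15", "0.16", "0.17", "0.18"] [] false none

-- ===== PRECONDITION & SPEC =====
def Spec_get_migration_path (from_version : String) (to_version : String) (out : List String) : Prop := out = get_migration_path_alt from_version to_version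
instance (from_version : String) (to_version : String) (out : List String) : Decidable (Spec_get_migration_path from_version to_version out) := by unfold Spec_get_migration_path; infer_instance

-- ===== CLAIM =====
def Claim_equal_get_migration_path : Prop := ∀ (from_version : String) (to_version : String), Dom_get_migration_path from_version to_version → Spec_get_migration_path from_version to_version (get_migration_path from_version to_version)

-- ===== LEMMAS AND PROOFS =====

-- Any string is either one of the four supported versions or absent from the table.
lemma pv_idx_cases (s : String) :
    s = "0.15" ∨ s = "0.16" ∨ s = "0.17" ∨ s = "0.18" ∨
    s ∉ (["0.15", "0.16", "0.17", "0.18"] : List String) := by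
  by_cases h1 : s = "0.15"; · exact Or.inl h1
  by_cases h2 : s = "0.16"; · exact Or.inr (Or.inl h2)
  by_cases h3 : s = "0.17"; · exact Or.inr (Or.inr (Or.inl h3))
  by_cases h4 : s = "0.18"; · exact Or.inr (Or.inr (Or.inr (Or.inl h4)))
  refine Or.inr (Or.inr (Or.inr (Or.inr ?_)))
  simp only [List.mem_cons, List.not_mem_nil, or_false]; tauto

-- If to_version never occurs, the walk falls off the end and returns [].
lemma gmpWalk_to_absent (f t : String) (l : List String) (ht : t ∉ l) :
    ∀ path c prev, gmpWalk f t l path c prev = [] := by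
  induction l with
  | nil => intro path c prev; rfl
  | cons v rest ih =>
    intro path c prev
    have hvt : (v == t) = false := by
      simp only [beq_eq_false_iff_ne]; intro h; exact ht (h ▸ List.mem_cons_self ..)
    simp only [gmpWalk, hvt]
    exact ih (fun h => ht (List.mem_cons_of_mem _ h)) _ _ _

-- If from_version never occurs, collecting stays false, so the walk returns [].
lemma gmpWalk_from_absent (f t : String) (l : List String) (hf : f ∉ l) :
    ∀ path prev, gmpWalk f t l path false prev = [] := by
  induction l with
  | nil => intro path prev; rfl
  | cons v rest ih =>
    intro path prev
    have hvf : (v == f) = false := by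
      simp only [beq_eq_false_iff_ne]; intro h; exact hf (h ▸ List.mem_cons_self ..)
    simp only [gmpWalk, hvf, Bool.false_eq_true, if_false, Bool.or_false]
    split
    · rfl
    · exact ih (fun h => hf (List.mem_cons_of_mem _ h)) _ _

-- A returns [] when either version is unknown.
lemma pvA_none_left (f t : String)
    (h : f ∉ (["0.15", "0.16", "0.17", "0.18"] : List String)) :
    get_migration_path f t = [] := by
  have h' : PySem.List.index? ["0.15", "0.16", "0.17", "0.18"] f = none :=
    (PySem.List.index?_eq_none_iff ..).mpr h
  simp only [get_migration_path, h']

lemma pvA_none_right (f t : String)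
    (h : t ∉ (["0.15", "0.16", "0.17", "0.18"] : List String)) :
    get_migration_path f t = [] := by
  have h' : PySem.List.index? ["0.15", "0.16", "0.17", "0.18"] t = none :=
    (PySem.List.index?_eq_none_iff ..).mpr h
  simp only [get_migration_path, h']
  rcases PySem.List.index? ["0.15", "0.16", "0.17", "0.18"] f <;> rfl

-- ===== VERDICT =====
theorem get_migration_path_spec : Claim_equal_get_migration_path := by
  intro f t _
  unfold Spec_get_migration_path
  rcases pv_idx_cases t with ht | ht | ht | ht | ht
  all_goals first
    | (rw [pvA_none_right f t ht]; exact (gmpWalk_to_absent f t _ ht _ _ _).symm)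
    | (rcases pv_idx_cases f with hf | hf | hf | hf | hf
       all_goals first
         | (rw [pvA_none_left f t hf]; exact (gmpWalk_from_absent f t _ hf _ _).symm)
         | (subst hf; subst ht; decide))
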